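-- pv_equiv track=rewrite | github.com/thierryc/Glyphs-mcp | plugin-manager/Glyphs MCP.glyphsPlugin/Contents/Resources/kerning_proof_engine.py | pack_tokens
-- ===== SOURCE A (Python) =====
-- from typing import Iterable, List, Sequence, Tuple
--
-- def pack_tokens(tokens: Sequence[str], per_line: int = 12) -> str:
--     """Pack already-rendered tokens into lines."""
--
--     if per_line <= 0:
--         per_line = 12
--
--     lines: List[str] = []
--     current: List[str] = []
--     for tok in tokens:
--         if tok is None:
--             continue
--         tok = str(tok)
--         if not tok:
--             continue
--         current.append(tok)
--         if len(current) >= per_line: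
--             lines.append(" ".join(current))
--             current = []
--
--     if current:
--         lines.append(" ".join(current))
--
--     return "\n".join(lines)
-- ===== SOURCE B (Python) =====
-- def pack_tokens(tokens, per_line=12):
--     """Pack already-rendered tokens into lines."""
--     if per_line <= 0:
--         per_line = 12
--     filtered = []
--     for t in tokens:
--         if t is None:
--             continue
--         s = str(t)
--         if s:
--             filtered.append(s)
--     lines = [" ".join(filtered[i:i + per_line]) for i in range(0, len(filtered), per_line)]
--     return "\n".join(lines)
-- ===== Notes on version B (the rewrite author's own statement) =====
-- stated objective: simpler
-- what changed: Replaces the single pass with an interleaved accumulator/flush state machine by a two-pass decomposition: one filtering pass producing the cleaned token list, then index-free chunking of that list into slices of per_line joined per line.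
import Mathlib
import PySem

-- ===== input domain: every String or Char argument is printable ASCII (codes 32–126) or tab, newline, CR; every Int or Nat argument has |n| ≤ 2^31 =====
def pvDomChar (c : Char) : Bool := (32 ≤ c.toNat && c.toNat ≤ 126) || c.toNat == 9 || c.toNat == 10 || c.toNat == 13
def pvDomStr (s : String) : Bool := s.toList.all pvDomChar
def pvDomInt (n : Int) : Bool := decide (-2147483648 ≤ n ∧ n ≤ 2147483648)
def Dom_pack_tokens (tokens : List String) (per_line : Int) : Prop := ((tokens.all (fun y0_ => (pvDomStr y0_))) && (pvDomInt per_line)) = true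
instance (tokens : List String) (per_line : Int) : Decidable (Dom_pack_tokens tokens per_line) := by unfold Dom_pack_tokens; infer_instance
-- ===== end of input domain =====

-- B replaces A's single accumulator/flush pass by a two-pass decomposition: filter out empty tokens, then chunk the cleaned list into slices of per_line; the return values are identical (no argument is mutated by either version).

-- ===== PORT A =====
-- A's loop state: (finished lines, current line's tokens); a line is flushed when full.
def packA_loop (n : Int) : List String → List String × List String → List String × List String
  | [], st => st
  | t :: ts, (lines, cur) =>
    if t = "" then packA_loop n ts (lines, cur)
    else
      let cur' := cur ++ [t]
      if n ≤ (cur'.length : Int) then packA_loop n ts (lines ++ [PySem.Str.join " " cur'], [])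
      else packA_loop n ts (lines, cur')

-- A's trailing 'if current: lines.append(" ".join(current))'
def packA_flush (st : List String × List String) : List String :=
  if st.2 ≠ [] then st.1 ++ [PySem.Str.join " " st.2] else st.1

def pack_tokens (tokens : List String) (per_line : Int) : String :=
  let n := if per_line ≤ 0 then (12 : Int) else per_line
  PySem.Str.join "\n" (packA_flush (packA_loop n tokens ([], [])))

-- ===== PORT B =====
-- slice chunking of the cleaned list: each line takes the next m+1 tokens (m = per_line - 1 ≥ 0)
def packB_chunk (m : Nat) : List String → List String
  | [] => []
  | x :: xs => PySem.Str.join " " (x :: xs.take m) :: packB_chunk m (xs.drop m)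
termination_by l => l.length
decreasing_by simp

def pack_tokens_alt (tokens : List String) (per_line : Int) : String :=
  let n : Nat := (if per_line ≤ 0 then (12 : Int) else per_line).toNat
  let filtered := tokens.filter (fun t => t ≠ "")
  PySem.Str.join "\n" (packB_chunk (n - 1) filtered)

-- ===== PRECONDITION & SPEC =====
def Spec_pack_tokens (tokens : List String) (per_line : Int) (out : String) : Prop := out = pack_tokens_alt tokens per_line
instance (tokens : List String) (per_line : Int) (out : String) : Decidable (Spec_pack_tokens tokens per_line out) := by unfold Spec_pack_tokens; infer_instance

-- ===== CLAIM (what is proved, stated in full; the proofs are below) =====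
def Claim_equal_pack_tokens : Prop := ∀ (tokens : List String) (per_line : Int), Dom_pack_tokens tokens per_line → Spec_pack_tokens tokens per_line (pack_tokens tokens per_line)

-- ===== LEMMAS AND PROOFS =====

lemma packB_chunk_nil (m : Nat) : packB_chunk m [] = [] := by simp [packB_chunk]

lemma packB_chunk_cons (m : Nat) (x : String) (xs : List String) :
    packB_chunk m (x :: xs) = PySem.Str.join " " (x :: xs.take m) :: packB_chunk m (xs.drop m) := by
  simp [packB_chunk]

-- A's loop ignores empty tokens, so it equals the loop over the filtered list.
lemma packA_loop_filter (n : Int) (ts : List String) (st : List String × List String) :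
    packA_loop n ts st = packA_loop n (ts.filter (fun t => t ≠ "")) st := by
  induction ts generalizing st with
  | nil => rfl
  | cons t ts ih =>
    obtain ⟨lines, cur⟩ := st
    by_cases h : t = ""
    · rw [List.filter_cons_of_neg (by simp [h])]
      simp only [packA_loop, if_pos h]
      exact ih _
    · rw [List.filter_cons_of_pos (by simp [h])]
      by_cases hfull : n ≤ (((cur ++ [t]).length : Nat) : Int)
      · simp only [packA_loop, if_neg h, if_pos hfull]
        exact ih _
      · simp only [packA_loop, if_neg h, if_neg hfull]
        exact ih _

-- the invariant: with fewer than m+1 tokens pending, A's flushed loop result equals the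
-- already-finished lines followed by the slice-chunking of (pending ++ remaining).
lemma packA_loop_chunk (m : Nat) (ts : List String) (hts : ∀ t ∈ ts, t ≠ "")
    (lines cur : List String) (hcur : cur.length ≤ m) :
    packA_flush (packA_loop ((m : Int) + 1) ts (lines, cur)) = lines ++ packB_chunk m (cur ++ ts) := by
  induction ts generalizing lines cur with
  | nil =>
    cases cur with
    | nil => simp [packA_loop, packA_flush, packB_chunk_nil]
    | cons c cs =>
      have hl : cs.length ≤ m := by simp at hcur; omega
      simp [packA_loop, packA_flush, packB_chunk_cons,
        List.take_of_length_le hl, List.drop_eq_nil_of_le hl, packB_chunk_nil]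
  | cons t ts ih =>
    have ht : t ≠ "" := hts t (by simp)
    have hts' : ∀ s ∈ ts, s ≠ "" := fun s hs => hts s (by simp [hs])
    by_cases hfull : ((m : Int) + 1) ≤ ((cur ++ [t]).length : Int)
    · have hm : cur.length = m := by simp at hfull; omega
      have step : packA_loop ((m : Int) + 1) (t :: ts) (lines, cur)
          = packA_loop ((m : Int) + 1) ts (lines ++ [PySem.Str.join " " (cur ++ [t])], []) := by
        simp only [packA_loop, if_neg ht]
        rw [if_pos hfull]
      rw [step, ih hts' _ [] (Nat.zero_le m)]
      have hsplit : packB_chunk m (cur ++ t :: ts)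
          = PySem.Str.join " " (cur ++ [t]) :: packB_chunk m ts := by
        cases cur with
        | nil =>
          simp at hm
          simp [packB_chunk_cons, ← hm]
        | cons c cs =>
          have hcs : m = cs.length + 1 := by simp at hm; omega
          have htake : (cs ++ t :: ts).take m = cs ++ [t] := by
            rw [hcs, List.take_append]
            simp [List.take_of_length_le (show cs.length ≤ cs.length + 1 by omega)]
          have hdrop : (cs ++ t :: ts).drop m = ts := by
            rw [hcs, List.drop_append]
            simp [List.drop_eq_nil_of_le (show cs.length ≤ cs.length + 1 by omega)]
          simp [packB_chunk_cons, htake, hdrop]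
      rw [hsplit]
      simp
    · have hlen : (cur ++ [t]).length ≤ m := by simp at hfull ⊢; omega
      have step : packA_loop ((m : Int) + 1) (t :: ts) (lines, cur)
          = packA_loop ((m : Int) + 1) ts (lines, cur ++ [t]) := by
        simp only [packA_loop, if_neg ht]
        rw [if_neg hfull]
      rw [step, ih hts' _ _ hlen]
      simp

-- ===== VERDICT (by name: the statement is the Claim_ definition above) =====
theorem pack_tokens_spec : Claim_equal_pack_tokens := by
  intro tokens per_line _
  unfold Spec_pack_tokens pack_tokens pack_tokens_alt
  dsimp only
  set nI : Int := if per_line ≤ 0 then (12 : Int) else per_line with hnI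
  have h1 : 1 ≤ nI := by rw [hnI]; split <;> omega
  have hcast : ((nI.toNat - 1 : Nat) : Int) + 1 = nI := by omega
  have key := packA_loop_chunk (nI.toNat - 1) (tokens.filter (fun t => t ≠ ""))
    (fun t ht => by simpa using (List.mem_filter.mp ht).2) [] [] (Nat.zero_le _)
  rw [hcast] at key
  rw [packA_loop_filter, key]
  simp
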